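-- pv_equiv track=rewrite | github.com/mfujiwara/atcoder-ruby | abc009/4.py | ppow
-- ===== SOURCE A (Python) =====
-- def mult(m1, m2):
--     n=len(m1)
--     ret=[[0]*n for _ in range(n)]
--     for i in range(n):
--         for j in range(n):
--             for k in range(n):
--                 ret[i][j]^=m1[i][k]&m2[k][j]
--     return ret
--
-- def ppow(m,n):
--     if n==0:
--         mm=[[pow(2,33)-1 if i==j else 0 for j in range(len(m))] for i in range(len(m))]
--         return mm
--     if n%2==0:
--         return ppow(mult(m,m), n//2)
--     else:
--         return mult(ppow(mult(m,m), n//2),m)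
-- ===== SOURCE B (Python) =====
-- def mult(m1, m2):
--     n=len(m1)
--     ret=[[0]*n for _ in range(n)]
--     for i in range(n):
--         for j in range(n):
--             for k in range(n):
--                 ret[i][j]^=m1[i][k]&m2[k][j]
--     return ret
--
-- def ppow(m, n):
--     size = len(m)
--     result = [[pow(2, 33) - 1 if i == j else 0 for j in range(size)] for i in range(size)]
--     base = m
--     while n > 0:
--         if n % 2:
--             result = mult(result, base)
--         base = mult(base, base)
--         n //= 2
--     return result
-- ===== Notes on version B (the rewrite author's own statement) =====
-- stated objective: alternative
-- what changed: Replaced A's recursive squaring (which builds the answer on the way back up, multiplying by m in odd steps) with an explicit iterative binary-exponentiation loop that starts from the identity matrix and multiplies an accumulator by the running square while shifting the exponent; mult is kept as is.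
import Mathlib
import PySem

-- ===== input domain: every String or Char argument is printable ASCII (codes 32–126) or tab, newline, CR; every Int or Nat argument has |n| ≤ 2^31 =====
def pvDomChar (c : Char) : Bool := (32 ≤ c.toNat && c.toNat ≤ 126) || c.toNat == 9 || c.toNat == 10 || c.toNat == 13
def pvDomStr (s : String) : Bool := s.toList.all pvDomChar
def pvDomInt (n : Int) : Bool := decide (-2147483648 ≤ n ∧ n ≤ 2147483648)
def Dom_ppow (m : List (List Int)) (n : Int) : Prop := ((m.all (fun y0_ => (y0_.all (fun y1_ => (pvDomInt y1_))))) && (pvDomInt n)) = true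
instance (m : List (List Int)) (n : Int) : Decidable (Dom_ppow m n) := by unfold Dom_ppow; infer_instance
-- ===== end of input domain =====

-- B replaces A's recursive squaring with an explicit iterative binary-exponentiation loop
-- (identity accumulator, square-and-multiply); mult is unchanged.  Objective: alternative.

-- ===== PORT A =====
-- shared helper `mult` (both Pythons contain it verbatim).
-- Python indexes m1[i][k] / m2[k][j] and raises IndexError out of range; Pre_ppow keeps all
-- reads in range, so the `.getD … 0` defaults are never reached on admitted inputs.
-- ret[i][j] is accumulated independently of every other cell, so the three nested loops are
-- transliterated as row/column maps whose cell (i,j) xor-folds over k from the initial 0.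
def dotAX (m1 m2 : List (List Int)) (nn i j : Nat) : Int :=
  (List.range nn).foldl
    (fun acc k => Int.xor acc (Int.land ((m1.getD i []).getD k 0) ((m2.getD k []).getD j 0))) 0

def mult (m1 m2 : List (List Int)) : List (List Int) :=
  (List.range m1.length).map (fun i => (List.range m1.length).map (fun j => dotAX m1 m2 m1.length i j))

-- identity matrix [[pow(2,33)-1 if i==j else 0 for j in range(s)] for i in range(s)]
def identM (s : Nat) : List (List Int) :=
  (List.range s).map (fun i => (List.range s).map (fun j => if i = j then (2:Int) ^ 33 - 1 else 0))

-- Python tests `n == 0`; for n < 0 the recursion never terminates (RecursionError), which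
-- Pre_ppow excludes — the `n ≤ 0` guard only makes the port total there.
def ppow (m : List (List Int)) (n : Int) : List (List Int) :=
  if _h : n ≤ 0 then identM m.length
  else if PySem.Int.mod n 2 = 0 then ppow (mult m m) (PySem.Int.floordiv n 2)
  else mult (ppow (mult m m) (PySem.Int.floordiv n 2)) m
termination_by n.toNat
decreasing_by
  all_goals
    rw [PySem.Int.floordiv_eq_ediv_of_pos (by omega : (0:Int) < 2)]
    omega

-- ===== PORT B =====
-- while n > 0: if n % 2: result = mult(result, base); base = mult(base, base); n //= 2
def ppowLoop (result base : List (List Int)) (n : Int) : List (List Int) :=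
  if _h : 0 < n then
    ppowLoop (if PySem.Int.mod n 2 ≠ 0 then mult result base else result)
      (mult base base) (PySem.Int.floordiv n 2)
  else result
termination_by n.toNat
decreasing_by
  rw [PySem.Int.floordiv_eq_ediv_of_pos (by omega : (0:Int) < 2)]
  omega

def ppow_alt (m : List (List Int)) (n : Int) : List (List Int) :=
  ppowLoop (identM m.length) m n

-- ===== PRECONDITION & SPEC =====
-- Pre_: Python A raises RecursionError for n < 0, and IndexError when n > 0 and some row of m
-- is shorter than len(m) (mult reads m[i][k], m[k][j] for indices below len(m)); for n = 0 any m
-- is accepted.  Exactly those crashing inputs are excluded.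
def Pre_ppow (m : List (List Int)) (n : Int) : Prop :=
  0 ≤ n ∧ (n = 0 ∨ ∀ row ∈ m, m.length ≤ row.length)
instance (m : List (List Int)) (n : Int) : Decidable (Pre_ppow m n) := by
  unfold Pre_ppow; infer_instance

def pvWitness_ppow : List (List Int) × Int := ([[1, 2], [3, 4]], 5)

def Spec_ppow (m : List (List Int)) (n : Int) (out : List (List Int)) : Prop := out = ppow_alt m n
instance (m : List (List Int)) (n : Int) (out : List (List Int)) : Decidable (Spec_ppow m n out) := by
  unfold Spec_ppow; infer_instance

-- ===== CLAIM (what is proved, stated in full; the proofs are below) =====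
def Claim_equal_ppow : Prop := ∀ (m : List (List Int)) (n : Int), Dom_ppow m n → Pre_ppow m n → Spec_ppow m n (ppow m n)
-- ===== LEMMAS AND PROOFS =====

-- Int bitwise algebra, via testBit extensionality -------------------------------------------

theorem natTestBit_big (m e : Nat) (h : m ≤ e) : Nat.testBit m e = false := by
  apply Nat.testBit_lt_two_pow
  calc m < 2 ^ m := Nat.lt_two_pow_self
    _ ≤ 2 ^ e := Nat.pow_le_pow_right (by omega) h

theorem intTestBit_ext {a b : Int} (h : ∀ k, a.testBit k = b.testBit k) : a = b := by
  cases a with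
  | ofNat m =>
    cases b with
    | ofNat n =>
      have : m = n := Nat.eq_of_testBit_eq (fun k => by simpa [Int.testBit] using h k)
      simp [this]
    | negSucc n =>
      exfalso
      have hk := h (m + n)
      rw [show Int.testBit (Int.ofNat m) (m + n) = Nat.testBit m (m + n) from rfl,
          show Int.testBit (Int.negSucc n) (m + n) = !(Nat.testBit n (m + n)) from rfl,
          natTestBit_big m (m + n) (by omega), natTestBit_big n (m + n) (by omega)] at hk
      exact Bool.false_ne_true hk
  | negSucc m =>
    cases b with
    | ofNat n =>
      exfalso
      have hk := h (m + n)
      rw [show Int.testBit (Int.negSucc m) (m + n) = !(Nat.testBit m (m + n)) from rfl,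
          show Int.testBit (Int.ofNat n) (m + n) = Nat.testBit n (m + n) from rfl,
          natTestBit_big m (m + n) (by omega), natTestBit_big n (m + n) (by omega)] at hk
      exact Bool.false_ne_true hk.symm
    | negSucc n =>
      have : m = n := Nat.eq_of_testBit_eq (fun k => by
        have hk := h k
        rw [show Int.testBit (Int.negSucc m) k = !(Nat.testBit m k) from rfl,
            show Int.testBit (Int.negSucc n) k = !(Nat.testBit n k) from rfl] at hk
        simpa using hk)
      simp [this]

theorem intTestBit_zero (k : Nat) : Int.testBit 0 k = false := by
  show Nat.testBit 0 k = false
  simp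

theorem ixor_comm (a b : Int) : Int.xor a b = Int.xor b a := by
  refine intTestBit_ext (fun k => ?_)
  simp [Int.testBit_lxor, Bool.xor_comm]

theorem ixor_assoc (a b c : Int) : Int.xor (Int.xor a b) c = Int.xor a (Int.xor b c) := by
  refine intTestBit_ext (fun k => ?_)
  cases ha : a.testBit k <;> simp [Int.testBit_lxor, ha]

theorem ixor_zero (a : Int) : Int.xor a 0 = a := by
  refine intTestBit_ext (fun k => ?_)
  simp [Int.testBit_lxor, intTestBit_zero]

theorem zero_ixor (a : Int) : Int.xor 0 a = a := by
  rw [ixor_comm]; exact ixor_zero a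

theorem ixor_left_comm (a b c : Int) : Int.xor a (Int.xor b c) = Int.xor b (Int.xor a c) := by
  rw [← ixor_assoc, ixor_comm a b, ixor_assoc]

theorem iland_assoc (a b c : Int) : Int.land (Int.land a b) c = Int.land a (Int.land b c) := by
  refine intTestBit_ext (fun k => ?_)
  simp [Int.testBit_land, Bool.and_assoc]

theorem zero_iland (a : Int) : Int.land 0 a = 0 := by
  refine intTestBit_ext (fun k => ?_)
  simp [Int.testBit_land, intTestBit_zero]

theorem iland_xor_right (a b c : Int) :
    Int.land (Int.xor a b) c = Int.xor (Int.land a c) (Int.land b c) := by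
  refine intTestBit_ext (fun k => ?_)
  simp [Int.testBit_land, Int.testBit_lxor, Bool.and_xor_distrib_right]

theorem iland_xor_left (a b c : Int) :
    Int.land a (Int.xor b c) = Int.xor (Int.land a b) (Int.land a c) := by
  refine intTestBit_ext (fun k => ?_)
  simp [Int.testBit_land, Int.testBit_lxor, Bool.and_xor_distrib_left]

-- xor-sums -----------------------------------------------------------------------------------

def bsum (l : List Nat) (f : Nat → Int) : Int := l.foldl (fun a k => Int.xor a (f k)) 0

theorem iland_zero (a : Int) : Int.land a 0 = 0 := by
  refine intTestBit_ext (fun k => ?_)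
  simp [Int.testBit_land, intTestBit_zero]

theorem foldl_xor_acc (f : Nat → Int) : ∀ (l : List Nat) (acc : Int),
    l.foldl (fun a k => Int.xor a (f k)) acc = Int.xor acc (bsum l f) := by
  intro l
  induction l with
  | nil => intro acc; simp [bsum, List.foldl, ixor_zero]
  | cons k l ih =>
    intro acc
    show List.foldl _ (Int.xor acc (f k)) l = Int.xor acc (bsum (k :: l) f)
    rw [ih, show bsum (k :: l) f = List.foldl (fun a k => Int.xor a (f k)) (Int.xor 0 (f k)) l from rfl,
        ih (Int.xor 0 (f k)), zero_ixor, ixor_assoc]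

theorem bsum_cons (f : Nat → Int) (k : Nat) (l : List Nat) :
    bsum (k :: l) f = Int.xor (f k) (bsum l f) := by
  rw [show bsum (k :: l) f = List.foldl (fun a k => Int.xor a (f k)) (Int.xor 0 (f k)) l from rfl,
      foldl_xor_acc, zero_ixor]

theorem bsum_congr {f g : Nat → Int} : ∀ {l : List Nat}, (∀ k ∈ l, f k = g k) → bsum l f = bsum l g := by
  intro l
  induction l with
  | nil => intro _; rfl
  | cons k l ih =>
    intro h
    rw [bsum_cons, bsum_cons, h k (by simp), ih (fun x hx => h x (by simp [hx]))]

theorem bsum_zero : ∀ (l : List Nat), bsum l (fun _ => (0:Int)) = 0 := by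
  intro l
  induction l with
  | nil => rfl
  | cons k l ih => rw [bsum_cons, ih, ixor_zero]

theorem bsum_xor (f g : Nat → Int) : ∀ (l : List Nat),
    bsum l (fun k => Int.xor (f k) (g k)) = Int.xor (bsum l f) (bsum l g) := by
  intro l
  induction l with
  | nil => simp [bsum, List.foldl, ixor_zero]
  | cons k l ih =>
    rw [bsum_cons, bsum_cons, bsum_cons, ih, ixor_assoc,
        ixor_left_comm (g k) (bsum l f) (bsum l g), ← ixor_assoc]

theorem bsum_land_right (f : Nat → Int) (c : Int) : ∀ (l : List Nat),
    Int.land (bsum l f) c = bsum l (fun k => Int.land (f k) c) := by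
  intro l
  induction l with
  | nil => exact zero_iland c
  | cons k l ih => rw [bsum_cons, bsum_cons, iland_xor_right, ih]

theorem bsum_land_left (f : Nat → Int) (c : Int) : ∀ (l : List Nat),
    Int.land c (bsum l f) = bsum l (fun k => Int.land c (f k)) := by
  intro l
  induction l with
  | nil => exact iland_zero c
  | cons k l ih => rw [bsum_cons, bsum_cons, iland_xor_left, ih]

theorem bsum_swap (g : Nat → Nat → Int) : ∀ (l l' : List Nat),
    bsum l (fun k => bsum l' (g k)) = bsum l' (fun j => bsum l (fun k => g k j)) := by
  intro l l'
  induction l with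
  | nil => rw [show bsum [] (fun k => bsum l' (g k)) = 0 from rfl, ← bsum_zero l']; rfl
  | cons k l ih => simp only [bsum_cons, ih, ← bsum_xor]

-- matrix shape and entries -------------------------------------------------------------------

theorem length_mult (a b : List (List Int)) : (mult a b).length = a.length := by
  simp [mult]

theorem length_identM (s : Nat) : (identM s).length = s := by
  simp [identM]

theorem dotAX_eq_bsum (a b : List (List Int)) (nn i j : Nat) :
    dotAX a b nn i j = bsum (List.range nn) (fun k => Int.land ((a.getD i []).getD k 0) ((b.getD k []).getD j 0)) := by
  rfl

theorem mult_entry (a b : List (List Int)) {i j : Nat} (hi : i < a.length) (hj : j < a.length) :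
    (((mult a b).getD i []).getD j 0) = dotAX a b a.length i j := by
  simp [mult, List.getD, hi, hj]

theorem mult_assoc' {a b : List (List Int)} (hab : a.length = b.length) (c : List (List Int)) :
    mult (mult a b) c = mult a (mult b c) := by
  show (List.range (mult a b).length).map _ = (List.range a.length).map _
  rw [length_mult]
  apply List.map_congr_left
  intro i hi
  apply List.map_congr_left
  intro j hj
  replace hi := List.mem_range.mp hi
  replace hj := List.mem_range.mp hj
  rw [dotAX_eq_bsum, dotAX_eq_bsum]
  have hL : (bsum (List.range a.length) fun l =>
        Int.land (((mult a b).getD i []).getD l 0) ((c.getD l []).getD j 0))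
      = bsum (List.range a.length) (fun l => bsum (List.range a.length) (fun k =>
          Int.land (Int.land ((a.getD i []).getD k 0) ((b.getD k []).getD l 0))
            ((c.getD l []).getD j 0))) := by
    apply bsum_congr
    intro l hl
    dsimp only
    rw [mult_entry a b hi (List.mem_range.mp hl), dotAX_eq_bsum, bsum_land_right]
  have hR : (bsum (List.range a.length) fun k =>
        Int.land ((a.getD i []).getD k 0) (((mult b c).getD k []).getD j 0))
      = bsum (List.range a.length) (fun k => bsum (List.range a.length) (fun l =>
          Int.land ((a.getD i []).getD k 0)
            (Int.land ((b.getD k []).getD l 0) ((c.getD l []).getD j 0)))) := by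
    apply bsum_congr
    intro k hk
    dsimp only
    rw [mult_entry b c (hab ▸ List.mem_range.mp hk) (hab ▸ hj), dotAX_eq_bsum, ← hab,
        bsum_land_left]
  rw [hL, hR, bsum_swap]
  apply bsum_congr
  intro k _
  dsimp only
  apply bsum_congr
  intro l _
  dsimp only
  rw [iland_assoc]

-- left-multiplication power ------------------------------------------------------------------

def rmulpow (r b : List (List Int)) : Nat → List (List Int)
  | 0 => r
  | k + 1 => rmulpow (mult r b) b k

theorem rmulpow_mult (b : List (List Int)) : ∀ (k : Nat) (r : List (List Int)),
    mult (rmulpow r b k) b = rmulpow r b (k + 1) := by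
  intro k
  induction k with
  | zero => intro r; rfl
  | succ k ih =>
    intro r
    rw [show rmulpow r b (k + 1) = rmulpow (mult r b) b k from rfl, ih,
        show rmulpow r b (k + 1 + 1) = rmulpow (mult r b) b (k + 1) from rfl]

theorem rmulpow_sq (b : List (List Int)) : ∀ (k : Nat) (r : List (List Int)),
    r.length = b.length → rmulpow r (mult b b) k = rmulpow r b (2 * k) := by
  intro k
  induction k with
  | zero => intro r _; rfl
  | succ k ih =>
    intro r hr
    rw [show rmulpow r (mult b b) (k + 1) = rmulpow (mult r (mult b b)) (mult b b) k from rfl,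
        ih (mult r (mult b b)) (by rw [length_mult, hr]),
        ← mult_assoc' hr,
        show 2 * (k + 1) = (2 * k) + 1 + 1 by omega,
        show rmulpow r b (2 * k + 1 + 1) = rmulpow (mult r b) b (2 * k + 1) from rfl,
        show rmulpow (mult r b) b (2 * k + 1) = rmulpow (mult (mult r b) b) b (2 * k) from rfl]

-- the two ports against rmulpow --------------------------------------------------------------

theorem ppow_eq_rmulpow : ∀ (K : Nat) (n : Int), 0 ≤ n → n.toNat ≤ K →
    ∀ (m : List (List Int)), ppow m n = rmulpow (identM m.length) m n.toNat := by
  intro K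
  induction K with
  | zero =>
    intro n hn hK m
    have h0 : n = 0 := by omega
    subst h0
    rw [ppow]
    rfl
  | succ K ih =>
    intro n hn hK m
    by_cases h0 : n ≤ 0
    · have : n = 0 := by omega
      subst this
      rw [ppow]
      rfl
    · have hfd : PySem.Int.floordiv n 2 = n / 2 := PySem.Int.floordiv_eq_ediv_of_pos (by omega)
      have hmod : PySem.Int.mod n 2 = n % 2 := PySem.Int.mod_eq_emod_of_pos (by omega)
      have hd0 : (0:Int) ≤ n / 2 := by omega
      have hdK : (n / 2).toNat ≤ K := by omega
      rw [ppow, dif_neg h0, hfd, hmod,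
          ih (n / 2) hd0 hdK (mult m m), length_mult,
          rmulpow_sq m _ (identM m.length) (by rw [length_identM])]
      by_cases he : n % 2 = 0
      · rw [if_pos he]
        congr 1
        omega
      · rw [if_neg he, rmulpow_mult]
        congr 1
        omega

theorem ppowLoop_eq_rmulpow : ∀ (K : Nat) (n : Int), 0 ≤ n → n.toNat ≤ K →
    ∀ (r b : List (List Int)), r.length = b.length → ppowLoop r b n = rmulpow r b n.toNat := by
  intro K
  induction K with
  | zero =>
    intro n hn hK r b _
    have h0 : n = 0 := by omega
    subst h0
    rw [ppowLoop]
    rfl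
  | succ K ih =>
    intro n hn hK r b hrb
    by_cases h0 : 0 < n
    · have hfd : PySem.Int.floordiv n 2 = n / 2 := PySem.Int.floordiv_eq_ediv_of_pos (by omega)
      have hmod : PySem.Int.mod n 2 = n % 2 := PySem.Int.mod_eq_emod_of_pos (by omega)
      have hd0 : (0:Int) ≤ n / 2 := by omega
      have hdK : (n / 2).toNat ≤ K := by omega
      rw [ppowLoop, dif_pos h0, hfd, hmod]
      by_cases he : n % 2 = 0
      · rw [if_neg (by simp [he]),
            ih (n / 2) hd0 hdK r (mult b b) (by rw [length_mult, hrb]),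
            rmulpow_sq b _ r hrb]
        congr 1
        omega
      · rw [if_pos (by simp [he]),
            ih (n / 2) hd0 hdK (mult r b) (mult b b) (by rw [length_mult, length_mult, hrb]),
            rmulpow_sq b _ (mult r b) (by rw [length_mult, hrb]),
            show ∀ j, rmulpow (mult r b) b j = rmulpow r b (j + 1) from fun j => rfl]
        congr 1
        omega
    · have h0' : n = 0 := by omega
      subst h0'
      rw [ppowLoop]
      rfl

-- ===== VERDICT (by name: the statement is the Claim_ definition above) =====
theorem ppow_spec : Claim_equal_ppow := by
  intro m n _ hpre
  unfold Spec_ppow ppow_alt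
  rw [ppow_eq_rmulpow n.toNat n hpre.1 le_rfl m,
      ppowLoop_eq_rmulpow n.toNat n hpre.1 le_rfl (identM m.length) m (length_identM m.length)]
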